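-- pv_equiv track=rewrite | github.com/josfervi/Programming-for-Sport | zz_foobar/03-lvl3-1-fuel_injection_perfection/solution.py | add1
-- ===== SOURCE A (Python) =====
-- def add1(bits):
--
--     i = 0
--     while i < len(bits) and bits[i] == 1:
--         bits[i] = 0
--         i+= 1
--
--     if i == len(bits):
--         bits.append(1)
--         return bits
--
--     # { bits[i] == 0 }
--
--     bits[i] = 1
--     return bits
-- ===== SOURCE B (Python) =====
-- def add1(bits):
--     # Delegate the carry propagation to integer '+': pack the positions holding
--     # the digit 1 into an int, add one, and unpack exactly the bits that changed.
--     x = 0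
--     for b in reversed(bits):
--         x = 2 * x + (b == 1)
--     y = x + 1
--     changed = (x ^ y).bit_length()      # 1 + length of the low run of ones in x
--     bits[:] = [(y >> k) & 1 for k in range(changed)] + bits[changed:]
--     return bits
-- ===== Notes on version B (the rewrite author's own statement) =====
-- stated objective: alternative
-- what changed: Replaces A's in-place carry-propagation loop with bit arithmetic: fold the positions holding the digit 1 into an integer mask, let integer addition perform the carry, and splice the changed low bits (read off via xor and bit_length) onto the untouched tail.
import Mathlib
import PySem

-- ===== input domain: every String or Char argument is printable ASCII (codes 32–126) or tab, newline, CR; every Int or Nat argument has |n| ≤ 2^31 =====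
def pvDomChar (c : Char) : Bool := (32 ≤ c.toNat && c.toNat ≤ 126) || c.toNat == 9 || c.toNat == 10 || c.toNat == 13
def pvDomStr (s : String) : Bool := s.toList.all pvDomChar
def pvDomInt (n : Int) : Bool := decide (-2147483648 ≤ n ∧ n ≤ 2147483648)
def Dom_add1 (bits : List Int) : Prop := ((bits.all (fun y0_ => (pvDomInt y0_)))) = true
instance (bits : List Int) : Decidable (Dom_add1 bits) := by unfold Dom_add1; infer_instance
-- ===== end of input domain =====

-- B replaces A's explicit carry loop by bit arithmetic (pack the 1-positions into an
-- integer, add one, unpack the changed bits); both Pythons mutate `bits` in place to the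
-- same final list, and the theorem below is about the returned list.
-- ===== PORT A =====
-- while i < len(bits) and bits[i] == 1: bits[i] = 0; i += 1   — then the final if/else
def add1_go (bits : List Int) (i : Nat) : List Int :=
  if h : i < bits.length ∧ bits[i]! = 1 then
    add1_go (bits.set i 0) (i + 1)
  else if i = bits.length then bits ++ [1]
  else bits.set i 1
termination_by bits.length - i
decreasing_by simp; omega

def add1 (bits : List Int) : List Int := add1_go bits 0

-- ===== PORT B =====
-- x = 0; for b in reversed(bits): x = 2*x + (b == 1)
-- y = x + 1; changed = (x ^ y).bit_length()
-- bits[:] = [(y >> k) & 1 for k in range(changed)] + bits[changed:]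
def add1_alt (bits : List Int) : List Int :=
  let x := bits.reverse.foldl (fun v b => 2 * v + (if b = 1 then (1 : Int) else 0)) 0
  let y := x + 1
  let changed := PySem.Int.bitLength (PySem.Int.bxor x y)
  ((PySem.List.pyRange 0 (changed : Int) 1).map (fun k => PySem.Int.band (y >>> k.toNat) 1))
    ++ PySem.List.slice bits (some (changed : Int)) none

-- ===== PRECONDITION & SPEC =====
def Spec_add1 (bits : List Int) (out : List Int) : Prop := out = add1_alt bits
instance (bits : List Int) (out : List Int) : Decidable (Spec_add1 bits out) := by unfold Spec_add1; infer_instance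

-- ===== CLAIM (what is proved, stated in full; the proofs are below) =====
def Claim_equal_add1 : Prop := ∀ (bits : List Int), Dom_add1 bits → Spec_add1 bits (add1 bits)

-- ===== LEMMAS AND PROOFS =====
-- proof helper: the increment as a structural recursion, the meeting point of both ports
def incB : List Int → List Int
  | [] => [1]
  | x :: xs => if x = 1 then 0 :: incB xs else 1 :: xs

-- -------- A-side: add1 = incB --------
theorem add1_go_eq (k : Nat) : ∀ (bits : List Int) (i : Nat), bits.length - i = k → i ≤ bits.length →
    add1_go bits i = bits.take i ++ incB (bits.drop i) := by
  induction k with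
  | zero =>
    intro bits i hk hle
    have hi : i = bits.length := by omega
    rw [add1_go]
    simp [hi, incB]
  | succ k ih =>
    intro bits i hk hle
    have hi : i < bits.length := by omega
    rw [add1_go]
    rw [List.drop_eq_getElem_cons hi]
    have hbang : bits[i]! = bits[i] := getElem!_pos bits i hi
    by_cases h1 : bits[i] = 1
    · simp only [hbang, hi, h1, and_true, dif_pos]
      rw [ih (bits.set i 0) (i+1) (by simp; omega) (by simp; omega)]
      rw [List.set_eq_take_append_cons_drop, if_pos hi]
      have hti : (bits.take i ++ 0 :: bits.drop (i + 1)).take (i+1)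
          = bits.take i ++ [0] := by
        rw [List.take_append]
        simp [List.take_of_length_le, Nat.le_of_lt hi, List.length_take]
      have hdi : (bits.take i ++ 0 :: bits.drop (i + 1)).drop (i+1)
          = bits.drop (i + 1) := by
        rw [List.drop_append]
        simp [List.length_take, Nat.min_eq_left (Nat.le_of_lt hi)]
      rw [hti, hdi, incB]
      simp
    · have : ¬ (i < bits.length ∧ bits[i]! = 1) := by
        intro ⟨_, h⟩; rw [hbang] at h; exact h1 h
      rw [dif_neg this, if_neg (by omega)]
      rw [List.set_eq_take_append_cons_drop, if_pos hi, incB]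
      simp [h1]

theorem add1_eq_incB (bits : List Int) : add1 bits = incB bits := by
  rw [add1, add1_go_eq bits.length bits 0 (by omega) (by omega)]
  simp

-- -------- B-side: add1_alt = incB --------
-- the mask of 1-positions, Nat form, and B's Horner fold of it
def maskN : List Int → Nat
  | [] => 0
  | x :: xs => 2 * maskN xs + (if x = 1 then 1 else 0)

def maskF (bits : List Int) : Int :=
  bits.reverse.foldl (fun v b => 2 * v + (if b = 1 then (1 : Int) else 0)) 0

theorem maskF_cons (x : Int) (xs : List Int) :
    maskF (x :: xs) = 2 * maskF xs + (if x = 1 then 1 else 0) := by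
  simp [maskF, List.foldl_append]

theorem maskF_eq_maskN (xs : List Int) : maskF xs = ((maskN xs : Nat) : Int) := by
  induction xs with
  | nil => simp [maskF, maskN]
  | cons x xs ih =>
    rw [maskF_cons, ih, maskN]
    split_ifs <;> push_cast <;> ring

-- the k-th bit, Nat form
def bN (m k : Nat) : Nat := m / 2 ^ k % 2

theorem bN_succ (m k : Nat) : bN m (k + 1) = bN (m / 2) k := by
  simp [bN, Nat.div_div_eq_div_mul, pow_succ']

theorem band_shift (n : Int) (hn : 0 ≤ n) (k : Nat) :
    PySem.Int.band (n >>> ((k : Nat) : Int)) 1 = ((bN n.toNat k : Nat) : Int) := by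
  obtain ⟨m, rfl⟩ : ∃ m : Nat, n = (m : Int) := ⟨n.toNat, (Int.toNat_of_nonneg hn).symm⟩
  rw [show ((m : Int) >>> ((k : Nat) : Int)) = ((m >>> k : Nat) : Int) by simp [Int.natCast_shiftRight],
    show (1 : Int) = ((1 : Nat) : Int) by rfl, PySem.Int.band_natCast]
  simp [Nat.and_one_is_mod, Nat.shiftRight_eq_div_pow, bN]

-- xor of an odd and an even number: the carry-chain shape B relies on
theorem xor_odd_even (a b : Nat) : (2 * a + 1) ^^^ (2 * b) = 2 * (a ^^^ b) + 1 := by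
  have := Nat.bitwise_bit (f := bne) (a := true) (m := a) (b := false) (n := b)
  simpa [Nat.bit, HXor.hXor, Nat.xor, two_mul, Nat.mul_comm] using this

theorem xor_even_odd (a b : Nat) : (2 * a) ^^^ (2 * b + 1) = 2 * (a ^^^ b) + 1 := by
  have := Nat.bitwise_bit (f := bne) (a := false) (m := a) (b := true) (n := b)
  simpa [Nat.bit, HXor.hXor, Nat.xor, two_mul, Nat.mul_comm] using this

theorem bitLength_odd (t : Nat) :
    PySem.Int.bitLength ((2 * t + 1 : Nat) : Int) = PySem.Int.bitLength ((t : Nat) : Int) + 1 := by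
  rw [PySem.Int.bitLength_natCast (show 0 < 2 * t + 1 by omega)]
  congr 2
  omega

-- the core of B: the changed prefix read off y = mask + 1, then the untouched tail
theorem alt_core (xs : List Int) :
    (List.range (PySem.Int.bitLength ((maskN xs ^^^ (maskN xs + 1) : Nat) : Int))).map
        (fun k => ((bN (maskN xs + 1) k : Nat) : Int))
      ++ xs.drop (PySem.Int.bitLength ((maskN xs ^^^ (maskN xs + 1) : Nat) : Int)) = incB xs := by
  induction xs with
  | nil => decide
  | cons a xs ih =>
    by_cases ha : a = 1
    · -- leading 1: the carry moves into the tail, one changed bit is a 0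
      have hmask : maskN (a :: xs) = 2 * maskN xs + 1 := by simp [maskN, ha]
      have hxor : maskN (a :: xs) ^^^ (maskN (a :: xs) + 1)
          = 2 * (maskN xs ^^^ (maskN xs + 1)) + 1 := by
        rw [hmask, show 2 * maskN xs + 1 + 1 = 2 * (maskN xs + 1) by ring, xor_odd_even]
      rw [hxor, bitLength_odd, List.range_succ_eq_map, List.map_cons, List.map_map]
      have hy : maskN (a :: xs) + 1 = 2 * (maskN xs + 1) := by rw [hmask]; ring
      have hhead : bN (maskN (a :: xs) + 1) 0 = 0 := by
        rw [hy]; simp [bN, Nat.mul_mod_right]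
      have htail : ∀ k, bN (maskN (a :: xs) + 1) (k + 1) = bN (maskN xs + 1) k := by
        intro k; rw [hy, bN_succ]; congr 1; omega
      simp only [Function.comp_def, htail, hhead, List.drop_succ_cons]
      rw [incB, if_pos ha, List.cons_append, ih]
      simp
    · -- first non-1 digit: exactly one bit changes, the tail is kept verbatim
      have hmask : maskN (a :: xs) = 2 * maskN xs := by simp [maskN, ha]
      have hxor : maskN (a :: xs) ^^^ (maskN (a :: xs) + 1) = 1 := by
        rw [hmask, xor_even_odd, Nat.xor_self]
      have hbl1 : PySem.Int.bitLength ((1 : Nat) : Int) = 1 := by decide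
      have hhead : bN (maskN (a :: xs) + 1) 0 = 1 := by
        rw [hmask]; simp only [bN, pow_zero, Nat.div_one]; omega
      rw [hxor, hbl1, List.range_succ_eq_map, List.range_zero, List.map_nil, List.map_cons,
        List.map_nil, hhead, List.drop_succ_cons, List.drop_zero, incB, if_neg ha]
      simp

theorem alt_eq_incB (bits : List Int) : add1_alt bits = incB bits := by
  have hx : maskF bits = ((maskN bits : Nat) : Int) := maskF_eq_maskN bits
  have hy : maskF bits + 1 = ((maskN bits + 1 : Nat) : Int) := by rw [hx]; push_cast; ring
  have hxor : PySem.Int.bxor (maskF bits) (maskF bits + 1)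
      = ((maskN bits ^^^ (maskN bits + 1) : Nat) : Int) := by
    rw [hx, show ((maskN bits : Nat) : Int) + 1 = ((maskN bits + 1 : Nat) : Int) by push_cast; ring]
    exact PySem.Int.bxor_natCast _ _
  rw [add1_alt]
  show ((PySem.List.pyRange 0 ((PySem.Int.bitLength (PySem.Int.bxor (maskF bits) (maskF bits + 1)) : Nat) : Int) 1).map
      (fun k => PySem.Int.band ((maskF bits + 1) >>> k.toNat) 1))
      ++ PySem.List.slice bits (some ((PySem.Int.bitLength (PySem.Int.bxor (maskF bits) (maskF bits + 1)) : Nat) : Int)) none = incB bits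
  rw [hxor, PySem.List.slice_from_natCast, PySem.List.pyRange_one, ← alt_core bits]
  congr 1
  simp only [List.map_map, Int.sub_zero, Int.toNat_natCast]
  apply List.map_congr_left
  intro k _
  simp only [Function.comp_def]
  rw [hy, band_shift ((maskN bits + 1 : Nat) : Int) (by positivity) ((0 + (k : Int)).toNat)]
  simp

-- ===== VERDICT (by name: the statement is the Claim_ definition above) =====
theorem add1_spec : Claim_equal_add1 := by
  intro bits _
  show add1 bits = add1_alt bits
  rw [add1_eq_incB, alt_eq_incB]
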